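-- pv_equiv track=rewrite | github.com/11irik/Summer-Practice-2019-SSU | Common/Program.py | isnumberofevengreater
-- ===== SOURCE A (Python) =====
-- def isnumberofevengreater(st):
--     odds = []
--     evens = []
--
--     for i in st:
--         if i.isdigit():
--             if int(i) % 2 == 0:
--                 evens.append(i)
--             else:
--                 odds.append(i)
--
--     if len(evens) > len(odds):
--         return True
--     else:
--         return False
-- ===== SOURCE B (Python) =====
-- def isnumberofevengreater(st):
--     chars = list(st)
--     evens = sum(chars.count(d) for d in '02468')
--     odds = sum(chars.count(d) for d in '13579')
--     return evens > odds
-- ===== Notes on version B (the rewrite author's own statement) =====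
-- stated objective: alternative
-- what changed: Instead of classifying each character of st with isdigit/int/% in one pass into two lists, B iterates over the fixed ten-digit alphabet and tallies occurrences of each even and odd digit character with the library count, then compares the two totals.
import Mathlib
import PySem

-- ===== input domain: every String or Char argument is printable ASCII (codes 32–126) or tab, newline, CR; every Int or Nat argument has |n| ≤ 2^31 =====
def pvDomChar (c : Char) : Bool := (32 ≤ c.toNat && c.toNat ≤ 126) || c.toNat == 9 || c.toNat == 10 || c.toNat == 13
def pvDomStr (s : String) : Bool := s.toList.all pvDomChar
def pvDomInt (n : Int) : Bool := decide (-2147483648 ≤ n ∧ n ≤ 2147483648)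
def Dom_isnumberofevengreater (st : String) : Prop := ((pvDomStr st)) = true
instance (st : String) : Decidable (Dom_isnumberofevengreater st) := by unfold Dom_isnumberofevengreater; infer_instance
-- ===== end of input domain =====

-- B replaces the per-character classify-and-accumulate pass with ten library counts over the
-- fixed digit alphabet, compared as two totals (alternative decomposition, not claimed faster).

-- ===== PORT A =====
-- A: for each char, digit chars are appended to evens/odds lists; returns len(evens) > len(odds).
-- int(i) for an ASCII digit char is ported exactly as (i.toNat : Int) - 48.
def isnumberofevengreater (st : String) : Bool :=
  let p := st.toList.foldl
    (fun (p : List Char × List Char) i =>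
      if PySem.Chars.isdigit i then
        if PySem.Int.mod ((i.toNat : Int) - 48) 2 == 0 then (p.1, p.2 ++ [i])
        else (p.1 ++ [i], p.2)
      else p)
    (([] : List Char), ([] : List Char))
  if p.2.length > p.1.length then true else false

-- ===== PORT B =====
-- B: chars = list(st); evens/odds = sums of chars.count(d) over the even / odd digit alphabets.
def isnumberofevengreater_alt (st : String) : Bool :=
  let chars := st.toList
  let evens := (("02468".toList).map (fun d => PySem.List.count chars d)).sum
  let odds := (("13579".toList).map (fun d => PySem.List.count chars d)).sum
  decide (evens > odds)

-- ===== PRECONDITION & SPEC =====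
def Spec_isnumberofevengreater (st : String) (out : Bool) : Prop := out = isnumberofevengreater_alt st
instance (st : String) (out : Bool) : Decidable (Spec_isnumberofevengreater st out) := by unfold Spec_isnumberofevengreater; infer_instance

-- ===== CLAIM =====
def Claim_equal_isnumberofevengreater : Prop := ∀ (st : String), Dom_isnumberofevengreater st → Spec_isnumberofevengreater st (isnumberofevengreater st)

-- ===== LEMMAS AND PROOFS =====

-- A character compares equal (==) to another iff their code points do.
lemma pv_beq_toNat (c d : Char) : (c == d) = (c.toNat == d.toNat) := by
  by_cases h : c = d
  · simp [h]
  · have : c.toNat ≠ d.toNat := fun he => h (Char.ext (UInt32.toNat_inj.mp he))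
    simp [h, this]

-- A's even-branch test holds exactly on the even digit characters.
lemma pv_even_char (c : Char) :
    (PySem.Chars.isdigit c && (PySem.Int.mod ((c.toNat : Int) - 48) 2 == 0))
      = (['0','2','4','6','8'].contains c) := by
  simp only [List.contains_cons, List.contains, List.elem_nil, pv_beq_toNat]
  simp only [PySem.Chars.isdigit, Char.le_def, UInt32.le_iff_toNat_le]
  have hc : ('0' : Char).val.toNat = 48 := by decide
  have hc9 : ('9' : Char).val.toNat = 57 := by decide
  rw [hc, hc9]
  have hval : c.val.toNat = c.toNat := rfl
  rw [hval]
  by_cases hd : 48 ≤ c.toNat ∧ c.toNat ≤ 57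
  · obtain ⟨h1, h2⟩ := hd
    interval_cases h : c.toNat <;> simp_all
  · have e0 : ('0':Char).toNat = 48 := by decide
    have e2 : ('2':Char).toNat = 50 := by decide
    have e4 : ('4':Char).toNat = 52 := by decide
    have e6 : ('6':Char).toNat = 54 := by decide
    have e8 : ('8':Char).toNat = 56 := by decide
    simp only [e0, e2, e4, e6, e8]
    rcases Nat.lt_or_ge c.toNat 48 with hl | hg
    · simp [show ¬ 48 ≤ c.toNat by omega, show c.toNat ≠ 48 by omega,
        show c.toNat ≠ 50 by omega, show c.toNat ≠ 52 by omega,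
        show c.toNat ≠ 54 by omega, show c.toNat ≠ 56 by omega]
    · simp [show ¬ c.toNat ≤ 57 by omega, show c.toNat ≠ 48 by omega,
        show c.toNat ≠ 50 by omega, show c.toNat ≠ 52 by omega,
        show c.toNat ≠ 54 by omega, show c.toNat ≠ 56 by omega]

-- A's odd branch holds exactly on the odd digit characters.
lemma pv_odd_char (c : Char) :
    (PySem.Chars.isdigit c && !(PySem.Int.mod ((c.toNat : Int) - 48) 2 == 0))
      = (['1','3','5','7','9'].contains c) := by
  simp only [List.contains_cons, List.contains, List.elem_nil, pv_beq_toNat]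
  simp only [PySem.Chars.isdigit, Char.le_def, UInt32.le_iff_toNat_le]
  have hc : ('0' : Char).val.toNat = 48 := by decide
  have hc9 : ('9' : Char).val.toNat = 57 := by decide
  rw [hc, hc9]
  have hval : c.val.toNat = c.toNat := rfl
  rw [hval]
  by_cases hd : 48 ≤ c.toNat ∧ c.toNat ≤ 57
  · obtain ⟨h1, h2⟩ := hd
    interval_cases h : c.toNat <;> simp_all
  · have e1 : ('1':Char).toNat = 49 := by decide
    have e3 : ('3':Char).toNat = 51 := by decide
    have e5 : ('5':Char).toNat = 53 := by decide
    have e7 : ('7':Char).toNat = 55 := by decide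
    have e9 : ('9':Char).toNat = 57 := by decide
    simp only [e1, e3, e5, e7, e9]
    rcases Nat.lt_or_ge c.toNat 48 with hl | hg
    · simp [show ¬ 48 ≤ c.toNat by omega, show c.toNat ≠ 49 by omega,
        show c.toNat ≠ 51 by omega, show c.toNat ≠ 53 by omega,
        show c.toNat ≠ 55 by omega, show c.toNat ≠ 57 by omega]
    · simp [show ¬ c.toNat ≤ 57 by omega, show c.toNat ≠ 49 by omega,
        show c.toNat ≠ 51 by omega, show c.toNat ≠ 53 by omega,
        show c.toNat ≠ 55 by omega, show c.toNat ≠ 57 by omega]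

-- Summing the indicator of one character over a duplicate-free alphabet tests membership.
lemma pv_sum_ite (a : Char) (ds : List Char) (hnd : ds.Nodup) :
    (ds.map (fun d => if (d == a : Bool) then (1 : Nat) else 0)).sum
      = (if ds.contains a then 1 else 0) := by
  induction ds with
  | nil => simp
  | cons d ds ihd =>
    simp only [List.nodup_cons] at hnd
    simp only [List.map_cons, List.sum_cons, List.contains_cons]
    by_cases h : d = a
    · subst h
      have hz : ∀ x ∈ ds, (if (x == d : Bool) then (1 : Nat) else 0) = 0 := by
        intro x hx
        have : x ≠ d := fun he => hnd.1 (he ▸ hx)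
        simp [this]
      rw [List.map_congr_left hz]
      simp
    · have hda : (d == a) = false := by simp [h]
      have had : a ≠ d := fun he => h he.symm
      rw [ihd hnd.2]
      simp [hda, had]

-- Summing per-letter counts of a duplicate-free alphabet tallies membership.
lemma pv_sum_counts (l ds : List Char) (hnd : ds.Nodup) :
    (ds.map (fun d => l.count d)).sum = l.countP (fun c => ds.contains c) := by
  induction l with
  | nil => simp
  | cons a l ih =>
    have hcc : ds.map (fun d => (a :: l).count d)
        = ds.map (fun d => l.count d + if (d == a : Bool) then 1 else 0) := by
      apply List.map_congr_left
      intro d _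
      rw [List.count_cons]
      by_cases h : d = a
      · simp [h]
      · simp [h]; exact fun he => h he.symm
    rw [hcc, List.countP_cons]
    have hsplit : (ds.map (fun d => l.count d + if (d == a : Bool) then 1 else 0)).sum
        = (ds.map (fun d => l.count d)).sum
          + (ds.map (fun d => if (d == a : Bool) then (1 : Nat) else 0)).sum := by
      induction ds with
      | nil => simp
      | cons e es _ => simp; omega
    rw [hsplit, ih, pv_sum_ite a ds hnd]

-- A's accumulating fold: the two list lengths are membership counts.
lemma pv_foldA (l odds evens : List Char) :
    ((l.foldl
        (fun (p : List Char × List Char) i =>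
          if PySem.Chars.isdigit i then
            if PySem.Int.mod ((i.toNat : Int) - 48) 2 == 0 then (p.1, p.2 ++ [i])
            else (p.1 ++ [i], p.2)
          else p) (odds, evens)).2.length
        = evens.length + l.countP (fun c => PySem.Chars.isdigit c && (PySem.Int.mod ((c.toNat : Int) - 48) 2 == 0)))
    ∧ ((l.foldl
        (fun (p : List Char × List Char) i =>
          if PySem.Chars.isdigit i then
            if PySem.Int.mod ((i.toNat : Int) - 48) 2 == 0 then (p.1, p.2 ++ [i])
            else (p.1 ++ [i], p.2)
          else p) (odds, evens)).1.length
        = odds.length + l.countP (fun c => PySem.Chars.isdigit c && !(PySem.Int.mod ((c.toNat : Int) - 48) 2 == 0))) := by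
  induction l generalizing odds evens with
  | nil => simp
  | cons c l ih =>
    by_cases hd : PySem.Chars.isdigit c = true
    · by_cases hm : (PySem.Int.mod ((c.toNat : Int) - 48) 2 == 0) = true
      · obtain ⟨h1, h2⟩ := ih odds (evens ++ [c])
        simp only [List.foldl_cons, List.countP_cons]
        rw [if_pos hd, if_pos hm]
        constructor
        · rw [h1, if_pos (show _ = true by rw [hd, hm]; rfl)]
          simp [List.length_append]; omega
        · rw [h2, if_neg (show ¬(_ = true) by rw [hd, hm]; simp)]
          omega
      · have hmb : (PySem.Int.mod ((c.toNat : Int) - 48) 2 == 0) = false :=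
          Bool.eq_false_iff.mpr hm
        obtain ⟨h1, h2⟩ := ih (odds ++ [c]) evens
        simp only [List.foldl_cons, List.countP_cons]
        rw [if_pos hd, if_neg hm]
        constructor
        · rw [h1, if_neg (show ¬(_ = true) by rw [hd, hmb]; simp)]
          omega
        · rw [h2, if_pos (show _ = true by rw [hd, hmb]; rfl)]
          simp [List.length_append]; omega
    · have hdb : PySem.Chars.isdigit c = false := Bool.eq_false_iff.mpr hd
      obtain ⟨h1, h2⟩ := ih odds evens
      simp only [List.foldl_cons, List.countP_cons]
      rw [if_neg hd]
      constructor
      · rw [h1, if_neg (show ¬(_ = true) by rw [hdb]; simp)]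
        omega
      · rw [h2, if_neg (show ¬(_ = true) by rw [hdb]; simp)]
        omega

-- ===== VERDICT =====
theorem isnumberofevengreater_spec : Claim_equal_isnumberofevengreater := by
  intro st _
  unfold Spec_isnumberofevengreater isnumberofevengreater isnumberofevengreater_alt
  obtain ⟨hE, hO⟩ := pv_foldA st.toList [] []
  simp only [List.length_nil, Nat.zero_add] at hE hO
  have hBe : (("02468".toList).map (fun d => PySem.List.count st.toList d)).sum
      = st.toList.countP (fun c => PySem.Chars.isdigit c && (PySem.Int.mod ((c.toNat : Int) - 48) 2 == 0)) := by
    rw [show ("02468".toList) = ['0','2','4','6','8'] from rfl]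
    simp only [PySem.List.count_eq]
    rw [pv_sum_counts _ _ (by decide)]
    exact List.countP_congr (fun c _ => by rw [pv_even_char c])
  have hBo : (("13579".toList).map (fun d => PySem.List.count st.toList d)).sum
      = st.toList.countP (fun c => PySem.Chars.isdigit c && !(PySem.Int.mod ((c.toNat : Int) - 48) 2 == 0)) := by
    rw [show ("13579".toList) = ['1','3','5','7','9'] from rfl]
    simp only [PySem.List.count_eq]
    rw [pv_sum_counts _ _ (by decide)]
    exact List.countP_congr (fun c _ => by rw [pv_odd_char c])
  simp only [hBe, hBo, hE, hO]
  split_ifs with h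
  · exact (decide_eq_true h).symm
  · exact (decide_eq_false h).symm
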